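-- pv_equiv track=rewrite | github.com/hexemeister/SciELO_scraper | results_report.py | detectar_termos_e_campos
-- ===== SOURCE A (Python) =====
-- def detectar_termos_e_campos(rows: list[dict]) -> tuple[list[str], list[str]]:
--     """Detecta termos e campos a partir das colunas booleanas do CSV."""
--     if not rows:
--         return [], []
--     colunas = list(rows[0].keys())
--     campos_possiveis = ["titulo", "resumo", "keywords"]
--     termos: list[str] = []
--     campos_encontrados: set[str] = set()
--     for col in colunas:
--         for campo in campos_possiveis:
--             if col.endswith(f"_{campo}"):
--                 termo = col[: -(len(campo) + 1)]
--                 if termo and termo not in ("n_palavras", "n"):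
--                     if termo not in termos:
--                         termos.append(termo)
--                     campos_encontrados.add(campo)
--     campos = [c for c in campos_possiveis if c in campos_encontrados]
--     return termos, campos
-- ===== SOURCE B (Python) =====
-- def detectar_termos_e_campos(rows: list[dict]) -> tuple[list[str], list[str]]:
--     """Detecta termos e campos a partir das colunas booleanas do CSV."""
--     if not rows:
--         return [], []
--     colunas = list(rows[0].keys())
--     campos_possiveis = ["titulo", "resumo", "keywords"]
--     # staged: collect matches field-by-field, then restore column order by sorting
--     matches: list[tuple[int, str, str]] = []
--     for campo in campos_possiveis:
--         sufixo = "_" + campo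
--         for i, col in enumerate(colunas):
--             if col.endswith(sufixo):
--                 termo = col[: -len(sufixo)]
--                 if termo and termo not in ("n_palavras", "n"):
--                     matches.append((i, termo, campo))
--     matches.sort(key=lambda m: m[0])
--     termos = list(dict.fromkeys(m[1] for m in matches))
--     campos = [c for c in campos_possiveis if any(m[2] == c for m in matches)]
--     return termos, campos
-- ===== Notes on version B (the rewrite author's own statement) =====
-- stated objective: alternative
-- what changed: Replaces A's single column pass with two running accumulators (termos list, campos set) by a staged pipeline: collect (index, termo, campo) matches field-by-field, sort them back into column order, then derive termos by ordered dedup and campos by membership scans.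
import Mathlib
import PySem

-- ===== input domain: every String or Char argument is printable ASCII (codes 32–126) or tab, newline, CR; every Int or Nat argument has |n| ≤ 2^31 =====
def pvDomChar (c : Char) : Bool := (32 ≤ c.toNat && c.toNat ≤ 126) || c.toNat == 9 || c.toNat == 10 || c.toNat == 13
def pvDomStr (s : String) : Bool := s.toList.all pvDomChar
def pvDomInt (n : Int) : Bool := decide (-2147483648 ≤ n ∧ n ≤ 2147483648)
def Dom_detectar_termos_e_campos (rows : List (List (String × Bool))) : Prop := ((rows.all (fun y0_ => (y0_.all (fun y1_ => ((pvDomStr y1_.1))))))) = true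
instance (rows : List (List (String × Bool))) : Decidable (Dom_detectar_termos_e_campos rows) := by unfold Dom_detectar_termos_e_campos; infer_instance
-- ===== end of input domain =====

-- B replaces A's single column pass with running accumulators by a staged pipeline:
-- collect (index, termo, campo) matches field-by-field, sort them back into column
-- order, then derive termos by ordered dedup and campos by membership scans
-- (objective: alternative decomposition, same cost).

-- ===== PORT A =====
-- loop body of A's inner 'for campo in campos_possiveis' (kept as a helper)
def pvStepA (st : List String × PySem.Set String) (col campo : String) :
    List String × PySem.Set String :=
  if PySem.Str.endswith col ("_" ++ campo) then
    let termo := PySem.Str.slice col none (some (-(PySem.Str.len campo + 1)))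
    if termo ≠ "" ∧ termo ≠ "n_palavras" ∧ termo ≠ "n" then
      ((if termo ∈ st.1 then st.1 else st.1 ++ [termo]), PySem.Set.add st.2 campo)
    else st
  else st

def detectar_termos_e_campos (rows : List (List (String × Bool))) : List String × List String :=
  match rows with
  | [] => ([], [])
  | row :: _ =>
    let colunas := (PySem.Dict.ofList row).keys
    let campos_possiveis : List String := ["titulo", "resumo", "keywords"]
    let st := colunas.foldl
      (fun st col => campos_possiveis.foldl (fun st campo => pvStepA st col campo) st)
      ([], PySem.Set.empty)
    (st.1, campos_possiveis.filter (fun c => st.2.contains c))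

-- ===== PORT B =====
-- B's 'for i, col in enumerate(colunas): … matches.append((i, termo, campo))' for one campo
def pvMatchesFor (colunas : List String) (campo : String)
    (ms : List (Int × String × String)) : List (Int × String × String) :=
  let sufixo := "_" ++ campo
  (PySem.List.enumerate colunas 0).foldl
    (fun ms p =>
      if PySem.Str.endswith p.2 sufixo then
        let termo := PySem.Str.slice p.2 none (some (-(PySem.Str.len sufixo)))
        if termo ≠ "" ∧ termo ≠ "n_palavras" ∧ termo ≠ "n" then ms ++ [(p.1, termo, campo)]
        else ms
      else ms)
    ms

def detectar_termos_e_campos_alt (rows : List (List (String × Bool))) : List String × List String :=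
  match rows with
  | [] => ([], [])
  | row :: _ =>
    let colunas := (PySem.Dict.ofList row).keys
    let campos_possiveis : List String := ["titulo", "resumo", "keywords"]
    let ms := campos_possiveis.foldl (fun ms campo => pvMatchesFor colunas campo ms) []
    let sortedm := PySem.List.sorted ms (fun m => m.1) false
    let termos := PySem.List.dedup (sortedm.map (fun m => m.2.1))
    (termos, campos_possiveis.filter (fun c => sortedm.any (fun m => m.2.2 == c)))

-- ===== PRECONDITION & SPEC =====
def Spec_detectar_termos_e_campos (rows : List (List (String × Bool))) (out : List String × List String) : Prop := out = detectar_termos_e_campos_alt rows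
instance (rows : List (List (String × Bool))) (out : List String × List String) : Decidable (Spec_detectar_termos_e_campos rows out) := by unfold Spec_detectar_termos_e_campos; infer_instance

-- ===== CLAIM (what is proved, stated in full; the proofs are below) =====
def Claim_equal_detectar_termos_e_campos : Prop := ∀ (rows : List (List (String × Bool))), Dom_detectar_termos_e_campos rows → Spec_detectar_termos_e_campos rows (detectar_termos_e_campos rows)

-- ===== LEMMAS AND PROOFS =====

def pvTermoOf (p : Int × String) (campo : String) : String :=
  PySem.Str.slice p.2 none (some (-(PySem.Str.len ("_" ++ campo))))

-- classification of one enumerated column by one campo (what B records for it)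
def pvClsFor (campo : String) (p : Int × String) : Option (Int × String × String) :=
  if PySem.Str.endswith p.2 ("_" ++ campo) then
    if pvTermoOf p campo ≠ "" ∧ pvTermoOf p campo ≠ "n_palavras" ∧ pvTermoOf p campo ≠ "n" then
      some (p.1, pvTermoOf p campo, campo)
    else none
  else none

-- classification by the first (hence, by exclusivity, the only) matching campo
def pvCls (p : Int × String) : Option (Int × String × String) :=
  (pvClsFor "titulo" p).or ((pvClsFor "resumo" p).or (pvClsFor "keywords" p))

-- the two slice expressions for termo agree: len("_" ++ campo) = len campo + 1
theorem pv_len_sufixo (campo : String) :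
    PySem.Str.len ("_" ++ campo) = PySem.Str.len campo + 1 := by
  rw [PySem.Str.len_append]
  have : PySem.Str.len "_" = 1 := by decide
  omega

-- a column can end with at most one of the three suffixes
theorem pv_excl (col : String) :
    (PySem.Str.endswith col "_titulo" = true → PySem.Str.endswith col "_resumo" = false) ∧
    (PySem.Str.endswith col "_titulo" = true → PySem.Str.endswith col "_keywords" = false) ∧
    (PySem.Str.endswith col "_resumo" = true → PySem.Str.endswith col "_keywords" = false) := by
  have h : ∀ s1 s2 : List Char, s1.length ≤ s2.length → ¬ (s1 <:+ s2) →
      PySem.Chars.endswith col.toList s1 = true → PySem.Chars.endswith col.toList s2 = false := by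
    intro s1 s2 hl hns h1
    rw [PySem.Chars.endswith_iff] at h1
    rw [Bool.eq_false_iff]
    intro h2
    rw [PySem.Chars.endswith_iff] at h2
    exact hns (List.suffix_of_suffix_length_le h1 h2 hl)
  refine ⟨?_, ?_, ?_⟩ <;>
    · rw [PySem.Str.endswith_eq, PySem.Str.endswith_eq]
      exact h _ _ (by decide) (by decide)

theorem pv_foldl_filterMap {α β : Type} (g : α → Option β) (l : List α) (acc : List β)
    (f : List β → α → List β) (hf : ∀ acc x, f acc x = match g x with | some y => acc ++ [y] | none => acc) :
    l.foldl f acc = acc ++ l.filterMap g := by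
  induction l generalizing acc with
  | nil => simp
  | cons x xs ih =>
    rw [List.foldl_cons, hf, ih]
    cases hg : g x <;> simp [hg]

theorem pv_matchesFor_eq (colunas : List String) (campo : String)
    (ms : List (Int × String × String)) :
    pvMatchesFor colunas campo ms = ms ++ (PySem.List.enumerate colunas 0).filterMap (pvClsFor campo) := by
  apply pv_foldl_filterMap
  intro acc p
  simp only [pvClsFor, pvTermoOf]
  split_ifs <;> rfl

-- pvClsFor / pvStepA on a column whose suffix does not match this campo
theorem pv_clsFor_none (p : Int × String) (campo : String)
    (h : PySem.Str.endswith p.2 ("_" ++ campo) = false) : pvClsFor campo p = none := by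
  unfold pvClsFor
  simp only [h, Bool.false_eq_true, if_false]

theorem pv_stepA_none (col campo : String) (st : List String × PySem.Set String)
    (h : PySem.Str.endswith col ("_" ++ campo) = false) : pvStepA st col campo = st := by
  unfold pvStepA
  simp only [h, Bool.false_eq_true, if_false]

-- pvStepA on a matching column is exactly the update prescribed by pvClsFor
theorem pv_stepA_cls (p : Int × String) (campo : String) (st : List String × PySem.Set String)
    (h : PySem.Str.endswith p.2 ("_" ++ campo) = true) :
    pvStepA st p.2 campo =
      match pvClsFor campo p with
      | some m => ((if m.2.1 ∈ st.1 then st.1 else st.1 ++ [m.2.1]), PySem.Set.add st.2 m.2.2)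
      | none => st := by
  unfold pvStepA pvClsFor pvTermoOf
  rw [pv_len_sufixo campo]
  simp only [h, if_true]
  split_ifs <;> simp_all

-- A's three inner steps on one column collapse to the update prescribed by pvCls
theorem pv_colA (p : Int × String) (st : List String × PySem.Set String) :
    pvStepA (pvStepA (pvStepA st p.2 "titulo") p.2 "resumo") p.2 "keywords" =
      match pvCls p with
      | some m => ((if m.2.1 ∈ st.1 then st.1 else st.1 ++ [m.2.1]), PySem.Set.add st.2 m.2.2)
      | none => st := by
  obtain ⟨hTR, hTK, hRK⟩ := pv_excl p.2
  have hT : ("_" : String) ++ "titulo" = "_titulo" := by decide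
  have hR : ("_" : String) ++ "resumo" = "_resumo" := by decide
  have hK : ("_" : String) ++ "keywords" = "_keywords" := by decide
  by_cases e1 : PySem.Str.endswith p.2 "_titulo" = true
  · have z2 := pv_clsFor_none p "resumo" (by rw [hR]; exact hTR e1)
    have z3 := pv_clsFor_none p "keywords" (by rw [hK]; exact hTK e1)
    have hc : pvCls p = pvClsFor "titulo" p := by unfold pvCls; rw [z2, z3]; simp
    rw [pv_stepA_cls p "titulo" st (by rw [hT]; exact e1),
      hc]
    cases h1 : pvClsFor "titulo" p with
    | none =>
      rw [pv_stepA_none _ "resumo" _ (by rw [hR]; exact hTR e1),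
        pv_stepA_none _ "keywords" _ (by rw [hK]; exact hTK e1)]
    | some m =>
      rw [pv_stepA_none _ "resumo" _ (by rw [hR]; exact hTR e1),
        pv_stepA_none _ "keywords" _ (by rw [hK]; exact hTK e1)]
  · have e1' : PySem.Str.endswith p.2 "_titulo" = false := by
      rw [Bool.eq_false_iff]; exact e1
    have z1 := pv_clsFor_none p "titulo" (by rw [hT]; exact e1')
    rw [pv_stepA_none _ "titulo" _ (by rw [hT]; exact e1')]
    by_cases e2 : PySem.Str.endswith p.2 "_resumo" = true
    · have z3 := pv_clsFor_none p "keywords" (by rw [hK]; exact hRK e2)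
      have hc : pvCls p = pvClsFor "resumo" p := by unfold pvCls; rw [z1, z3]; simp
      rw [pv_stepA_cls p "resumo" st (by rw [hR]; exact e2), hc]
      cases h2 : pvClsFor "resumo" p with
      | none => rw [pv_stepA_none _ "keywords" _ (by rw [hK]; exact hRK e2)]
      | some m => rw [pv_stepA_none _ "keywords" _ (by rw [hK]; exact hRK e2)]
    · have e2' : PySem.Str.endswith p.2 "_resumo" = false := by
        rw [Bool.eq_false_iff]; exact e2
      have z2 := pv_clsFor_none p "resumo" (by rw [hR]; exact e2')
      rw [pv_stepA_none _ "resumo" _ (by rw [hR]; exact e2')]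
      by_cases e3 : PySem.Str.endswith p.2 "_keywords" = true
      · have hc : pvCls p = pvClsFor "keywords" p := by unfold pvCls; rw [z1, z2]; simp
        rw [pv_stepA_cls p "keywords" st (by rw [hK]; exact e3), hc]
      · have e3' : PySem.Str.endswith p.2 "_keywords" = false := by
          rw [Bool.eq_false_iff]; exact e3
        have z3 := pv_clsFor_none p "keywords" (by rw [hK]; exact e3')
        have hc : pvCls p = none := by unfold pvCls; rw [z1, z2, z3]; rfl
        rw [pv_stepA_none _ "keywords" _ (by rw [hK]; exact e3'), hc]

-- A's column fold equals the fold of the per-column classification over the enumeration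
theorem pv_foldA (cols : List String) (s : Int) (st : List String × PySem.Set String) :
    cols.foldl (fun st col =>
        (["titulo", "resumo", "keywords"] : List String).foldl (fun st campo => pvStepA st col campo) st) st =
      (PySem.List.enumerate cols s).foldl (fun st p =>
        match pvCls p with
        | some m => ((if m.2.1 ∈ st.1 then st.1 else st.1 ++ [m.2.1]), PySem.Set.add st.2 m.2.2)
        | none => st) st := by
  induction cols generalizing s st with
  | nil => simp [PySem.List.enumerate_nil]
  | cons c cs ih =>
    show cs.foldl _ (pvStepA (pvStepA (pvStepA st c "titulo") c "resumo") c "keywords") =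
      (PySem.List.enumerate cs (s + 1)).foldl _
        (match pvCls (s, c) with
          | some m => ((if m.2.1 ∈ st.1 then st.1 else st.1 ++ [m.2.1]), PySem.Set.add st.2 m.2.2)
          | none => st)
    rw [← pv_colA (s, c) st]
    exact ih (s + 1) _

-- the classification fold splits into the two accumulator folds over the match list
theorem pv_fold_split (l : List (Int × String × String)) (st : List String × PySem.Set String) :
    l.foldl (fun st m => ((if m.2.1 ∈ st.1 then st.1 else st.1 ++ [m.2.1]), PySem.Set.add st.2 m.2.2)) st =
      ((l.map (fun m => m.2.1)).foldl (fun acc t => if t ∈ acc then acc else acc ++ [t]) st.1,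
       (l.map (fun m => m.2.2)).foldl PySem.Set.add st.2) := by
  induction l generalizing st with
  | nil => simp
  | cons m ms ih => rw [List.foldl_cons, ih]; rfl

theorem pv_foldl_match (l : List (Int × String)) (st : List String × PySem.Set String) :
    l.foldl (fun st p =>
        match pvCls p with
        | some m => ((if m.2.1 ∈ st.1 then st.1 else st.1 ++ [m.2.1]), PySem.Set.add st.2 m.2.2)
        | none => st) st =
      (l.filterMap pvCls).foldl
        (fun st m => ((if m.2.1 ∈ st.1 then st.1 else st.1 ++ [m.2.1]), PySem.Set.add st.2 m.2.2)) st := by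
  induction l generalizing st with
  | nil => simp
  | cons p ps ih =>
    rw [List.foldl_cons, List.filterMap_cons]
    cases pvCls p
    · rw [ih]
    · rw [ih]
      rfl

-- the three field-major match lists are a permutation of the column-major one
theorem pv_perm (l : List (Int × String)) :
    (l.filterMap (pvClsFor "titulo") ++ l.filterMap (pvClsFor "resumo") ++ l.filterMap (pvClsFor "keywords")).Perm
      (l.filterMap pvCls) := by
  induction l with
  | nil => simp
  | cons p ps ih =>
    simp only [List.filterMap_cons]
    obtain ⟨hTR, hTK, hRK⟩ := pv_excl p.2
    have hT : ("_" : String) ++ "titulo" = "_titulo" := by decide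
    have hR : ("_" : String) ++ "resumo" = "_resumo" := by decide
    have hK : ("_" : String) ++ "keywords" = "_keywords" := by decide
    by_cases e1 : PySem.Str.endswith p.2 "_titulo" = true
    · have z2 := pv_clsFor_none p "resumo" (by rw [hR]; exact hTR e1)
      have z3 := pv_clsFor_none p "keywords" (by rw [hK]; exact hTK e1)
      have hc : pvCls p = pvClsFor "titulo" p := by unfold pvCls; rw [z2, z3]; simp
      rw [z2, z3, hc]
      cases h1 : pvClsFor "titulo" p with
      | none => simpa using ih
      | some m => simpa using ih.cons m
    · have z1 := pv_clsFor_none p "titulo" (by rw [hT, Bool.eq_false_iff]; exact e1)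
      by_cases e2 : PySem.Str.endswith p.2 "_resumo" = true
      · have z3 := pv_clsFor_none p "keywords" (by rw [hK]; exact hRK e2)
        have hc : pvCls p = pvClsFor "resumo" p := by unfold pvCls; rw [z1, z3]; simp
        rw [z1, z3, hc]
        cases h2 : pvClsFor "resumo" p with
        | none => simpa using ih
        | some m =>
          refine List.Perm.trans ?_ (ih.cons m)
          simpa [List.append_assoc] using
            (List.perm_middle (a := m) (l₁ := ps.filterMap (pvClsFor "titulo"))
              (l₂ := ps.filterMap (pvClsFor "resumo") ++ ps.filterMap (pvClsFor "keywords")))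
      · have z2 := pv_clsFor_none p "resumo" (by rw [hR, Bool.eq_false_iff]; exact e2)
        have hc : pvCls p = pvClsFor "keywords" p := by unfold pvCls; rw [z1, z2]; simp
        rw [z1, z2, hc]
        cases h3 : pvClsFor "keywords" p with
        | none => simpa using ih
        | some m =>
          refine List.Perm.trans ?_ (ih.cons m)
          simpa [List.append_assoc] using
            (List.perm_middle (a := m)
              (l₁ := ps.filterMap (pvClsFor "titulo") ++ ps.filterMap (pvClsFor "resumo"))
              (l₂ := ps.filterMap (pvClsFor "keywords")))

theorem pv_clsFor_fst (campo : String) (p : Int × String) (m : Int × String × String)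
    (h : pvClsFor campo p = some m) : m.1 = p.1 := by
  unfold pvClsFor at h
  split_ifs at h
  cases Option.some.inj h
  rfl

theorem pv_cls_fst (p : Int × String) (m : Int × String × String) (h : pvCls p = some m) :
    m.1 = p.1 := by
  unfold pvCls at h
  rcases Option.or_eq_some_iff.mp h with h1 | ⟨_, h2⟩
  · exact pv_clsFor_fst _ p m h1
  · rcases Option.or_eq_some_iff.mp h2 with h3 | ⟨_, h4⟩
    · exact pv_clsFor_fst _ p m h3
    · exact pv_clsFor_fst _ p m h4

theorem pv_pairwise (cols : List String) :
    ((PySem.List.enumerate cols 0).filterMap pvCls).Pairwise (fun a b => a.1 < b.1) := by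
  apply List.Pairwise.filterMap
  · intro a b hab x hx y hy
    rw [pv_cls_fst a x hx, pv_cls_fst b y hy]
    exact hab
  · exact PySem.List.pairwise_lt_enumerate cols 0

-- A's "if termo in termos" update is Set.add on the termos list
theorem pv_add_mem (acc : List String) (t : String) :
    (if t ∈ acc then acc else acc ++ [t]) = PySem.Set.add acc t := by
  simp only [PySem.Set.add]
  by_cases h : t ∈ acc
  · rw [if_pos h, if_pos (by simpa [PySem.Set.contains_iff] using h)]
  · rw [if_neg h, if_neg (by simpa [PySem.Set.contains_iff] using h)]

-- membership predicates of the two campos filters agree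
theorem pv_contains_any (L : List (Int × String × String)) (c : String) :
    PySem.Set.contains ((L.map (fun m => m.2.2)).foldl PySem.Set.add PySem.Set.empty) c =
      L.any (fun m => m.2.2 == c) := by
  rw [Bool.eq_iff_iff]
  rw [show (PySem.Set.empty : PySem.Set String) = [] from rfl, ← PySem.Set.ofList_eq_foldl]
  rw [PySem.Set.contains_iff, PySem.Set.mem_ofList, List.any_eq_true]
  simp only [List.mem_map, beq_iff_eq]

-- ===== VERDICT (by name: the statement is the Claim_ definition above) =====
theorem detectar_termos_e_campos_spec : Claim_equal_detectar_termos_e_campos := by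
  intro rows _
  unfold Spec_detectar_termos_e_campos detectar_termos_e_campos detectar_termos_e_campos_alt
  cases rows with
  | nil => rfl
  | cons row rest =>
    simp only
    set colunas := (PySem.Dict.ofList row).keys with hcol
    set L := (PySem.List.enumerate colunas 0).filterMap pvCls with hL
    -- B's matches list sorts to L
    have hmatches : (["titulo", "resumo", "keywords"] : List String).foldl
        (fun ms campo => pvMatchesFor colunas campo ms) [] =
        (PySem.List.enumerate colunas 0).filterMap (pvClsFor "titulo") ++
        (PySem.List.enumerate colunas 0).filterMap (pvClsFor "resumo") ++
        (PySem.List.enumerate colunas 0).filterMap (pvClsFor "keywords") := by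
      simp [List.foldl_cons, pv_matchesFor_eq, List.append_assoc]
    have hsorted : PySem.List.sorted ((["titulo", "resumo", "keywords"] : List String).foldl
        (fun ms campo => pvMatchesFor colunas campo ms) []) (fun m => m.1) false = L := by
      rw [hmatches]
      exact PySem.List.sorted_eq_of_perm_of_pairwise_lt _ _ _
        (pv_perm (PySem.List.enumerate colunas 0)).symm (pv_pairwise colunas)
    rw [hsorted]
    -- A's fold in terms of L
    rw [pv_foldA colunas 0, pv_foldl_match, ← hL, pv_fold_split]
    dsimp only
    refine Prod.ext ?_ ?_
    · -- termos
      rw [PySem.List.dedup_eq_ofList, PySem.Set.ofList_eq_foldl]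
      simp only [pv_add_mem]
    · -- campos
      dsimp only
      apply List.filter_congr
      intro c _
      exact pv_contains_any L c
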